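-- pv_equiv track=rewrite | github.com/Kenzie-Academy-Brasil-Developers/q3-sprint1-estruturas-de-repeticao-igormgg | main.py | remove_more_than_two_repetitions
-- ===== SOURCE A (Python) =====
-- def remove_more_than_two_repetitions(text):
--     output = ''
--
--     for i in range(len(text)):
--         try:
--             if text[i] == text[i+1] == text[i+2]:
--                 continue
--             else:
--                 output += text[i]
--         except:
--             output += text[i]
--
--     return output
-- ===== SOURCE B (Python) =====
-- def remove_more_than_two_repetitions(text):
--     parts = []
--     i = 0
--     n = len(text)
--     while i < n:
--         j = i
--         while j < n and text[j] == text[i]: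
--             j += 1
--         parts.append(text[i] * min(2, j - i))
--         i = j
--     return ''.join(parts)
-- ===== Notes on version B (the rewrite author's own statement) =====
-- stated objective: simpler
-- what changed: Replaces the per-index 3-wide window comparison with try/except tail handling by a single run-scanning pass that collapses each maximal run of equal characters to at most two copies.
import Mathlib
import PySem

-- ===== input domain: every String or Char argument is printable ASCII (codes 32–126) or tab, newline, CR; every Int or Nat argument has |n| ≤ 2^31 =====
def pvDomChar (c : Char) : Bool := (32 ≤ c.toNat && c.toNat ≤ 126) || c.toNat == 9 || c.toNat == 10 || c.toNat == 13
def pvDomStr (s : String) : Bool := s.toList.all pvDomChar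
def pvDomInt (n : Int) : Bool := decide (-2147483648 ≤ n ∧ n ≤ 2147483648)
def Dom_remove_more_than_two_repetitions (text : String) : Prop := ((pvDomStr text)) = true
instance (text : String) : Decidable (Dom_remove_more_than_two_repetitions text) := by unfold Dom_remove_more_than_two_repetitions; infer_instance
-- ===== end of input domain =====

-- B replaces A's per-index 3-wide window scan (with try/except tail handling) by a single
-- run-scanning pass collapsing each maximal run of equal characters to at most two copies (simpler).

-- ===== PORT A =====
-- one loop iteration of A: try text[i]==text[i+1]==text[i+2] → skip, else/except → append text[i]
def stepA (cs : List Char) (output : List Char) (i : Int) : List Char :=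
  match PySem.List.pyGet? cs i with
  | none => output  -- unreachable: i ∈ range(len(cs)), so text[i] never raises
  | some c =>
    match PySem.List.pyGet? cs (i+1) with
    | none => output ++ [c]                 -- IndexError at text[i+1] → except: output += text[i]
    | some c1 =>
      if c = c1 then
        match PySem.List.pyGet? cs (i+2) with
        | none => output ++ [c]             -- IndexError at text[i+2] → except: output += text[i]
        | some c2 => if c1 = c2 then output else output ++ [c]
      else output ++ [c]

def remove_more_than_two_repetitions (text : String) : String :=
  String.ofList ((PySem.List.pyRange 0 (text.toList.length : Int) 1).foldl (stepA text.toList) [])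

-- ===== PORT B =====
-- inner while loop: length of the leading run of c in xs, and the rest
def splitRun (c : Char) : List Char → Nat × List Char
  | [] => (0, [])
  | x :: xs => if x = c then ((splitRun c xs).1 + 1, (splitRun c xs).2) else (0, x :: xs)

theorem splitRun_snd_len (c : Char) : ∀ xs : List Char, (splitRun c xs).2.length ≤ xs.length := by
  intro xs
  induction xs with
  | nil => simp [splitRun]
  | cons x xs ih =>
    simp only [splitRun]
    split
    · exact Nat.le_succ_of_le ih
    · simp

-- outer while loop: one run per step, emitting min 2 (run length) copies
def runsB : List Char → List Char
  | [] => []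
  | c :: rest =>
      List.replicate (min 2 ((splitRun c rest).1 + 1)) c ++ runsB (splitRun c rest).2
termination_by l => l.length
decreasing_by simpa using Nat.lt_succ_of_le (splitRun_snd_len c rest)

def remove_more_than_two_repetitions_alt (text : String) : String :=
  String.ofList (runsB text.toList)

-- ===== PRECONDITION & SPEC =====
def Spec_remove_more_than_two_repetitions (text : String) (out : String) : Prop := out = remove_more_than_two_repetitions_alt text
instance (text : String) (out : String) : Decidable (Spec_remove_more_than_two_repetitions text out) := by unfold Spec_remove_more_than_two_repetitions; infer_instance

-- ===== CLAIM (what is proved, stated in full; the proofs are below) =====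
def Claim_equal_remove_more_than_two_repetitions : Prop := ∀ (text : String), Dom_remove_more_than_two_repetitions text → Spec_remove_more_than_two_repetitions text (remove_more_than_two_repetitions text)

-- ===== LEMMAS AND PROOFS =====

-- common reference function: keep cs[i] unless the next two characters exist and equal it
def g : List Char → List Char
  | a :: b :: c :: t => if a = b ∧ b = c then g (b :: c :: t) else a :: g (b :: c :: t)
  | l => l

theorem g_cons_of_head_ne (c : Char) (r : List Char) (h : r.head? ≠ some c) :
    g (c :: r) = c :: g r := by
  match r with
  | [] => rfl
  | [y] => rfl
  | y :: z :: t =>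
    have hy : c ≠ y := fun hcy => h (by simp [hcy])
    simp [g, hy]

theorem g_replicate (c : Char) (r : List Char) (h : r.head? ≠ some c) :
    ∀ m : Nat, g (List.replicate m c ++ r) = List.replicate (min 2 m) c ++ g r := by
  intro m
  induction m with
  | zero => simp
  | succ m ih =>
    match m with
    | 0 => simpa using g_cons_of_head_ne c r h
    | 1 =>
      match r, h with
      | [], _ => rfl
      | y :: ys, h =>
        have hy : c ≠ y := fun hcy => h (by simp [hcy])
        simp [g, hy, g_cons_of_head_ne c (y :: ys) h]
    | Nat.succ (Nat.succ s) =>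
      have h3 : g (List.replicate (s + 3) c ++ r) = g (List.replicate (s + 2) c ++ r) := by
        simp [List.replicate_succ, g]
      rw [show s.succ.succ + 1 = s + 3 from rfl, h3, show s + 2 = s.succ.succ from rfl, ih,
        show min 2 s.succ.succ = min 2 (s + 3) by omega]

theorem splitRun_decomp (c : Char) : ∀ xs : List Char,
    xs = List.replicate (splitRun c xs).1 c ++ (splitRun c xs).2 := by
  intro xs
  induction xs with
  | nil => rfl
  | cons x xs ih =>
    by_cases hx : x = c
    · simp only [splitRun, if_pos hx, List.replicate_succ, List.cons_append]
      rw [hx]; exact congrArg _ ih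
    · simp [splitRun, hx]

theorem splitRun_head (c : Char) : ∀ xs : List Char,
    (splitRun c xs).2.head? ≠ some c := by
  intro xs
  induction xs with
  | nil => simp [splitRun]
  | cons x xs ih =>
    by_cases hx : x = c
    · simpa [splitRun, hx] using ih
    · simp [splitRun, hx]

theorem runsB_eq_g (cs : List Char) : runsB cs = g cs := by
  generalize hn : cs.length = n
  induction n using Nat.strong_induction_on generalizing cs with
  | _ n ih =>
    match cs, hn with
    | [], _ => simp [runsB, g]
    | c :: rest, hn =>
      have hlen : (splitRun c rest).2.length < n := by
        subst hn; exact Nat.lt_succ_of_le (splitRun_snd_len c rest)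
      rw [runsB, ih _ hlen _ rfl]
      have hdec : c :: rest = List.replicate ((splitRun c rest).1 + 1) c ++ (splitRun c rest).2 := by
        conv_lhs => rw [splitRun_decomp c rest]
        simp [List.replicate_succ]
      conv_rhs => rw [hdec]
      rw [g_replicate c _ (splitRun_head c rest)]

theorem foldA (cs : List Char) : ∀ (xs pre out : List Char), cs = pre ++ xs →
    (PySem.List.pyRange (pre.length : Int) (cs.length : Int) 1).foldl (stepA cs) out
      = out ++ g xs := by
  intro xs
  induction xs with
  | nil =>
    intro pre out hcs
    subst hcs
    rw [PySem.List.pyRange_one_eq_nil (by simp)]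
    simp [g]
  | cons x xs ih =>
    intro pre out hcs
    have hlt : (pre.length : Int) < (cs.length : Int) := by
      subst hcs; simp
    rw [PySem.List.pyRange_one_cons hlt]
    simp only [List.foldl_cons]
    have hstep : stepA cs out (pre.length : Int) =
        (if xs[0]? = some x ∧ xs[1]? = some x then out else out ++ [x]) := by
      subst hcs
      have h0 : PySem.List.pyGet? (pre ++ x :: xs) (pre.length : Int) = some x :=
        PySem.List.pyGet?_append_length pre xs x
      have h1 : PySem.List.pyGet? (pre ++ x :: xs) ((pre.length : Int) + 1) = xs[0]? := by
        simpa using PySem.List.pyGet?_append_right (pre := pre) (ys := x :: xs) (k := 1)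
      have h2 : PySem.List.pyGet? (pre ++ x :: xs) ((pre.length : Int) + 2) = xs[1]? := by
        simpa using PySem.List.pyGet?_append_right (pre := pre) (ys := x :: xs) (k := 2)
      rw [stepA, h0, h1, h2]
      cases hx0 : xs[0]? with
      | none => simp
      | some b =>
        cases hx1 : xs[1]? with
        | none => by_cases hxb : x = b <;> simp [hxb]
        | some d =>
          by_cases hxb : x = b
          · subst hxb
            by_cases hxd : x = d
            · subst hxd; simp
            · simp [hxd, Ne.symm hxd]
          · simp [hxb, Ne.symm hxb]
    rw [hstep]
    have hpre' : ((pre ++ [x]).length : Int) = (pre.length : Int) + 1 := by simp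
    have hcs' : cs = (pre ++ [x]) ++ xs := by simpa using hcs
    rw [← hpre', ih (pre ++ [x]) _ hcs']
    match xs with
    | [] => simp [g]
    | [b] => by_cases hxb : x = b <;> simp [g, hxb]
    | b :: d :: t =>
      have hiff : ((b :: d :: t)[0]? = some x ∧ (b :: d :: t)[1]? = some x) ↔ (x = b ∧ b = d) := by
        simp only [List.getElem?_cons_zero, List.getElem?_cons_succ, Option.some.injEq]
        constructor <;> rintro ⟨rfl, rfl⟩ <;> exact ⟨rfl, rfl⟩
      by_cases hc : x = b ∧ b = d
      · rw [if_pos (hiff.mpr hc)]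
        simp [g, hc.1, hc.2]
      · rw [if_neg (fun h => hc (hiff.mp h))]
        simp [g, hc]

-- ===== VERDICT (by name: the statement is the Claim_ definition above) =====
theorem remove_more_than_two_repetitions_spec : Claim_equal_remove_more_than_two_repetitions := by
  intro text _
  unfold Spec_remove_more_than_two_repetitions
  unfold remove_more_than_two_repetitions remove_more_than_two_repetitions_alt
  have h := foldA text.toList text.toList [] [] (by simp)
  simp only [List.length_nil, Nat.cast_zero] at h
  rw [h, runsB_eq_g]
  rfl
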